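-- pv_equiv track=rewrite | github.com/mson0129/tiny_python_projects | 21_tictactoe/tictactoe.py | format_board
-- ===== SOURCE A (Python) =====
-- def format_board(board: str):
--     horizontal_border = '-' * 13
--     vertical_border = ' | '
--
--     rows: list = []
--     rows.append(horizontal_border)
--     for row_index in range(0, 3):
--         row = (vertical_border + vertical_border.join([board[cell] if board[cell] != '.' else str(cell + 1) for cell in range(row_index * 3, (row_index + 1) * 3)]) + vertical_border).strip()
--         rows.append(row)
--         rows.append(horizontal_border)
--
--     return '\n'.join(rows)
-- ===== SOURCE B (Python) =====
-- def format_board(board: str):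
--     out = '-' * 13
--     for i in range(9):
--         out += '\n| ' if i % 3 == 0 else ' | '
--         c = board[i]
--         out += c if c != '.' else str(i + 1)
--         if i % 3 == 2:
--             out += ' |\n' + '-' * 13
--     return out
-- ===== Notes on version B (the rewrite author's own statement) =====
-- stated objective: alternative
-- what changed: B is a single fused pass over the nine cells with one string accumulator, choosing each separator/border by index arithmetic (i%3), with no intermediate row lists, no join, no strip and no template; A builds a list of rows per 3-cell slice with join+strip and joins at the end.
import Mathlib
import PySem

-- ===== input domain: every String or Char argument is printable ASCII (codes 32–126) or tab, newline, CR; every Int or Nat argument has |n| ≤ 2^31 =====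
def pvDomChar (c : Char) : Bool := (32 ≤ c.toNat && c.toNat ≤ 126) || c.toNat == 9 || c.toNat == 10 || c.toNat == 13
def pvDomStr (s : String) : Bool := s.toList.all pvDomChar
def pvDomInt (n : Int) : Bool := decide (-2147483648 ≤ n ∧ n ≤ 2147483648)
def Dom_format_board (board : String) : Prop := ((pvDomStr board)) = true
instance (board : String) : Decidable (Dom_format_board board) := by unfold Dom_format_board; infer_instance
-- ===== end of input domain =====

-- B builds the board in one fused pass over the nine cells with a string accumulator,
-- choosing separators by index arithmetic, instead of A's per-row join+strip; return value only.

-- ===== PORT A =====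
-- one cell's display string: board[cell] if board[cell] != '.' else str(cell + 1)
def pvCell (board : String) (cell : Int) : String :=
  let c := PySem.List.pyGetD board.toList cell ' '   -- board[cell]; default unreachable under Pre_
  if c ≠ '.' then String.ofList [c] else PySem.Int.toStr (cell + 1)

def format_board (board : String) : String :=
  let horizontal_border : String := String.ofList (List.replicate 13 '-')  -- '-' * 13
  let vertical_border : String := " | "
  let rows : List String := [horizontal_border]
  let rows := (PySem.List.pyRange 0 3 1).foldl (fun rows row_index =>
    let row := PySem.Str.strip
      (vertical_border ++
        PySem.Str.join vertical_border
          ((PySem.List.pyRange (row_index * 3) ((row_index + 1) * 3) 1).map (pvCell board)) ++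
        vertical_border)
    rows ++ [row, horizontal_border]) rows
  PySem.Str.join "\n" rows

-- ===== PORT B =====
def format_board_alt (board : String) : String :=
  (PySem.List.pyRange 0 9 1).foldl (fun out i =>
    let out := out ++ (if PySem.Int.mod i 3 = 0 then "\n| " else " | ")
    let c := PySem.List.pyGetD board.toList i ' '   -- board[i]; default unreachable under Pre_
    let out := out ++ (if c ≠ '.' then String.ofList [c] else PySem.Int.toStr (i + 1))
    if PySem.Int.mod i 3 = 2 then out ++ " |\n-------------" else out)
    "-------------"

-- ===== PRECONDITION & SPEC =====
-- A (and B) raise IndexError when the board has fewer than 9 cells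
def Pre_format_board (board : String) : Prop := 9 ≤ board.length
instance (board : String) : Decidable (Pre_format_board board) := by unfold Pre_format_board; infer_instance
def pvWitness_format_board : String := "X.O..OX.."
def Spec_format_board (board : String) (out : String) : Prop := out = format_board_alt board
instance (board : String) (out : String) : Decidable (Spec_format_board board out) := by unfold Spec_format_board; infer_instance

-- ===== CLAIM (what is proved, stated in full; the proofs are below) =====
def Claim_equal_format_board : Prop := ∀ (board : String), Dom_format_board board → Pre_format_board board → Spec_format_board board (format_board board)

-- ===== LEMMAS AND PROOFS =====
-- stripping a row framed by '|' only removes the outer single spaces, whatever the cells hold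
theorem strip_row (a b c : List Char) :
    PySem.Chars.strip (' '::'|'::' ':: (a ++ ' '::'|'::' ':: (b ++ ' '::'|'::' ':: (c ++ [' ','|',' '])))) =
    '|'::' ':: (a ++ ' '::'|'::' ':: (b ++ ' '::'|'::' ':: (c ++ [' ','|']))) := by
  simp [PySem.Chars.strip, PySem.Chars.lstrip, PySem.Chars.rstrip, PySem.Chars.isspace]

-- ===== VERDICT (by name: the statement is the Claim_ definition above) =====
theorem format_board_spec : Claim_equal_format_board := by
  intro board hdom hpre
  unfold Spec_format_board format_board format_board_alt
  rw [← String.toList_inj]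
  simp [PySem.List.pyRange_one_cons, PySem.Str.join, PySem.Chars.join, PySem.Str.strip,
    List.intercalate, strip_row, PySem.List.pyGetD, String.toList_append, PySem.Int.mod,
    pvCell]
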